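-- pv_equiv track=rewrite | github.com/d-feng/LLM_RAG | improved_agent_logger_FINAL (1).py | normalize_line_breaks
-- ===== SOURCE A (Python) =====
-- def normalize_line_breaks(text: str) -> str:
--     """
--     Convert both \\n (escaped) and \n (actual) to consistent newlines
--     Handles cases where text has been double-escaped or more
--     """
--     # Handle multiple levels of escaping - keep replacing until no more \\n
--     while '\\n' in text:
--         text = text.replace('\\n', '\n')
--
--     # Also handle other escaped characters
--     while '\\t' in text:
--         text = text.replace('\\t', '\t')
--
--     while '\\r' in text:
--         text = text.replace('\\r', '\r')
--
--     return text
-- ===== SOURCE B (Python) =====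
-- def normalize_line_breaks(text: str) -> str:
--     """Single left-to-right scan instead of repeated global replace passes."""
--     mapping = {'n': '\n', 't': '\t', 'r': '\r'}
--     out = []
--     i = 0
--     n = len(text)
--     while i < n:
--         if text[i] == '\\' and i + 1 < n and text[i + 1] in mapping:
--             out.append(mapping[text[i + 1]])
--             i += 2
--         else:
--             out.append(text[i])
--             i += 1
--     return ''.join(out)
-- ===== Notes on version B (the rewrite author's own statement) =====
-- stated objective: faster
-- what changed: Replaces the three while-loops of repeated global str.replace passes with a single left-to-right character scan that emits each unescaped character once.
import Mathlib
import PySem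

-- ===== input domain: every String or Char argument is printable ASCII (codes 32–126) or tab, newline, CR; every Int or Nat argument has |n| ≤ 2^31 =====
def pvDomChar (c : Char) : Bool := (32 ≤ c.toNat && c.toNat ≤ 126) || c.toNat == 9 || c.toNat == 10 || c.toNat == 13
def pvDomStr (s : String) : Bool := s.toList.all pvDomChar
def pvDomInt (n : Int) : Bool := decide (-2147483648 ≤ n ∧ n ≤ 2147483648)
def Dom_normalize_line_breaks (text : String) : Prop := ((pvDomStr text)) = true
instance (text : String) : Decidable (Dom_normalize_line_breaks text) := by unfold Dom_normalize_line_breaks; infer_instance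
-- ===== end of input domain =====

-- B replaces A's three while-loops of repeated global str.replace passes with ONE
-- left-to-right character scan (single pass, no intermediate strings).

-- ===== PORT A =====
-- rep1 is a PROOF-SIDE characterisation of one str.replace pass for the two-char
-- pattern ['\\', c] with one-char replacement [e]; the port itself uses
-- PySem.Chars.replace / PySem.Chars.isIn.  rep1 and the next few lemmas live up
-- here only because the port's termination proof cites replace_eq_rep1 and
-- rep1_length_lt by name.
def rep1 (c e : Char) : List Char → List Char
  | x :: y :: t => if x = '\\' ∧ y = c then e :: rep1 c e t else x :: rep1 c e (y :: t)
  | l => l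
  termination_by l => l.length

lemma rep1_nil (c e : Char) : rep1 c e [] = [] := by rw [rep1]; simp

lemma rep1_single (c e x : Char) : rep1 c e [x] = [x] := by rw [rep1]; simp

lemma rep1_cons₂ (c e x y : Char) (t : List Char) :
    rep1 c e (x :: y :: t) =
      if x = '\\' ∧ y = c then e :: rep1 c e t else x :: rep1 c e (y :: t) := by
  rw [rep1]

-- one pass of Python's str.replace with pattern "\c" and one-char replacement is rep1
lemma go_spec (c e : Char) : ∀ (fuel : Nat) (l acc : List Char), l.length ≤ fuel →
    PySem.Chars.replace.go ['\\', c] [e] fuel l acc = acc.reverse ++ rep1 c e l := by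
  intro fuel
  induction fuel with
  | zero =>
    intro l acc hl
    have : l = [] := by cases l <;> simp_all
    subst this
    rw [PySem.Chars.replace.go.eq_def, rep1_nil]
    try simp
  | succ n ih =>
    intro l acc hl
    match l with
    | [] =>
      rw [PySem.Chars.replace.go.eq_def, rep1_nil]
      try simp
    | [x] =>
      rw [PySem.Chars.replace.go.eq_def]
      have hpre : List.isPrefixOf ['\\', c] [x] = false := by
        simp [List.isPrefixOf]
      simp only [hpre, Bool.false_eq_true, if_false]
      rw [ih [] (x :: acc) (by simp), rep1_nil, rep1_single]
      try simp
    | x :: y :: t =>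
      rw [PySem.Chars.replace.go.eq_def]
      by_cases hm : x = '\\' ∧ y = c
      · have hpre : List.isPrefixOf ['\\', c] (x :: y :: t) = true := by
          simp [List.isPrefixOf, hm.1, hm.2]
        simp only [hpre, if_true]
        have hlt : t.length ≤ n := by simp at hl; omega
        rw [show List.drop (['\\', c].length) (x :: y :: t) = t from rfl]
        rw [ih t (([e].reverse) ++ acc) hlt, rep1_cons₂]
        simp [hm]
      · have hpre : List.isPrefixOf ['\\', c] (x :: y :: t) = false := by
          simp [List.isPrefixOf]
          intro hx hy
          have hx' : x = '\\' := by first | exact hx | exact hx.symm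
          have hy' : y = c := by first | exact hy | exact hy.symm
          exact absurd ⟨hx', hy'⟩ hm
        simp only [hpre, Bool.false_eq_true, if_false]
        have hlt : (y :: t).length ≤ n := by simp at hl ⊢; omega
        rw [ih (y :: t) (x :: acc) hlt, rep1_cons₂]
        simp [hm]

lemma replace_eq_rep1 (c e : Char) (l : List Char) :
    PySem.Chars.replace l ['\\', c] [e] = rep1 c e l := by
  rw [PySem.Chars.replace]
  simp only [List.isEmpty_cons, Bool.false_eq_true, if_false]
  rw [go_spec c e l.length l [] le_rfl]
  simp

lemma rep1_length_le (c e : Char) : ∀ (n : Nat) (l : List Char), l.length ≤ n →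
    (rep1 c e l).length ≤ l.length := by
  intro n
  induction n with
  | zero => intro l hl
            have : l = [] := by cases l <;> simp_all
            subst this; rw [rep1_nil]
  | succ n ih =>
    intro l hl
    match l with
    | [] => rw [rep1_nil]
    | [x] => rw [rep1_single]
    | x :: y :: t =>
      rw [rep1_cons₂]
      split_ifs with hm
      · have := ih t (by simp at hl; omega)
        simp at this ⊢; omega
      · have := ih (y :: t) (by simp at hl ⊢; omega)
        simp at this ⊢; omega

lemma rep1_length_lt (c e : Char) : ∀ (n : Nat) (l : List Char), l.length ≤ n →
    ['\\', c] <:+: l → (rep1 c e l).length < l.length := by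
  intro n
  induction n with
  | zero => intro l hl hx
            have : l = [] := by cases l <;> simp_all
            subst this
            have := hx.length_le; simp at this
  | succ n ih =>
    intro l hl hx
    match l with
    | [] => have := hx.length_le; simp at this
    | [x] => have := hx.length_le; simp at this
    | x :: y :: t =>
      rw [rep1_cons₂]
      split_ifs with hm
      · have := rep1_length_le c e t.length t le_rfl
        simp; omega
      · rcases List.infix_cons_iff.mp hx with hp | hi
        · rcases List.cons_prefix_cons.mp hp with ⟨hx1, hp2⟩
          rcases List.cons_prefix_cons.mp hp2 with ⟨hy1, -⟩
          exact absurd ⟨hx1.symm, hy1.symm⟩ hm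
        · have := ih (y :: t) (by simp at hl ⊢; omega) hi
          simp at this ⊢; omega

-- Python A: three 'while pattern in text: text = text.replace(pattern, repl)' loops.
def whileReplace (c e : Char) (l : List Char) : List Char :=
  if h : PySem.Chars.isIn ['\\', c] l = true then
    whileReplace c e (PySem.Chars.replace l ['\\', c] [e])
  else l
  termination_by l.length
  decreasing_by
    rw [replace_eq_rep1]
    exact rep1_length_lt c e l.length l le_rfl ((PySem.Chars.isIn_iff_infix _ _).mp h)

def normalize_line_breaks (text : String) : String :=
  String.ofList (whileReplace 'r' '\r' (whileReplace 't' '\t' (whileReplace 'n' '\n' text.toList)))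

-- ===== PORT B =====
def bMap : PySem.Dict Char Char := PySem.Dict.ofList [('n', '\n'), ('t', '\t'), ('r', '\r')]

-- Source B's index loop with an output buffer, as structural recursion over the characters.
def scanEsc : List Char → List Char
  | x :: y :: t =>
    if x = '\\' then
      match PySem.Dict.get? bMap y with
      | some e => e :: scanEsc t
      | none => x :: scanEsc (y :: t)
    else x :: scanEsc (y :: t)
  | l => l
  termination_by l => l.length

def normalize_line_breaks_alt (text : String) : String :=
  String.ofList (scanEsc text.toList)

-- ===== PRECONDITION & SPEC =====
def Spec_normalize_line_breaks (text : String) (out : String) : Prop := out = normalize_line_breaks_alt text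
instance (text : String) (out : String) : Decidable (Spec_normalize_line_breaks text out) := by unfold Spec_normalize_line_breaks; infer_instance

-- ===== CLAIM (what is proved, stated in full; the proofs are below) =====
def Claim_equal_normalize_line_breaks : Prop := ∀ (text : String), Dom_normalize_line_breaks text → Spec_normalize_line_breaks text (normalize_line_breaks text)

-- ===== LEMMAS AND PROOFS =====

lemma scanEsc_nil : scanEsc [] = [] := by rw [scanEsc]; simp

lemma scanEsc_single (x : Char) : scanEsc [x] = [x] := by rw [scanEsc]; simp

lemma scanEsc_cons₂ (x y : Char) (t : List Char) :
    scanEsc (x :: y :: t) =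
      if x = '\\' then
        match PySem.Dict.get? bMap y with
        | some e => e :: scanEsc t
        | none => x :: scanEsc (y :: t)
      else x :: scanEsc (y :: t) := by
  rw [scanEsc]

lemma scanEsc_bs_hit (y e : Char) (t : List Char)
    (hg : PySem.Dict.get? bMap y = some e) :
    scanEsc ('\\' :: y :: t) = e :: scanEsc t := by
  rw [scanEsc_cons₂]; simp [hg]

lemma scanEsc_bs_miss (y : Char) (t : List Char)
    (hg : PySem.Dict.get? bMap y = none) :
    scanEsc ('\\' :: y :: t) = '\\' :: scanEsc (y :: t) := by
  rw [scanEsc_cons₂]; simp [hg]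

lemma scanEsc_not_bs (x y : Char) (t : List Char) (hx : x ≠ '\\') :
    scanEsc (x :: y :: t) = x :: scanEsc (y :: t) := by
  rw [scanEsc_cons₂]; simp [hx]

lemma bMap_get?_none (y : Char) (hn : y ≠ 'n') (ht : y ≠ 't') (hr : y ≠ 'r') :
    PySem.Dict.get? bMap y = none := by
  have hkeys : PySem.Dict.keys bMap = ['n', 't', 'r'] := by decide
  rw [PySem.Dict.get?_eq_none_iff_not_mem_keys, hkeys]
  simp [hn, ht, hr]

lemma rep1_bs_match (c e : Char) (t : List Char) :
    rep1 c e ('\\' :: c :: t) = e :: rep1 c e t := by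
  rw [rep1_cons₂]; simp

lemma rep1_bs_miss (c e y : Char) (t : List Char) (hy : y ≠ c) :
    rep1 c e ('\\' :: y :: t) = '\\' :: rep1 c e (y :: t) := by
  rw [rep1_cons₂]; simp [hy]

lemma prefix_two_iff (a b x : Char) (X : List Char) :
    ([a, b] <+: x :: X) ↔ a = x ∧ X.head? = some b := by
  cases X with
  | nil => simp [List.cons_prefix_cons]
  | cons z t => simp [List.cons_prefix_cons, eq_comm]

lemma rep1_head (c e y : Char) (t : List Char) :
    (rep1 c e (y :: t)).head? = some e ∨ (rep1 c e (y :: t)).head? = some y := by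
  cases t with
  | nil => rw [rep1_single]; right; rfl
  | cons z t' =>
    rw [rep1_cons₂]
    split_ifs with hm
    · left; rfl
    · right; rfl

lemma rep1_cons_of_ne (c e x : Char) (X : List Char) (hx : x ≠ '\\') :
    rep1 c e (x :: X) = x :: rep1 c e X := by
  cases X with
  | nil => rw [rep1_single, rep1_nil]
  | cons y t => rw [rep1_cons₂]; simp [hx]

lemma rep1_cons_bs (c e : Char) (X : List Char) (hX : X.head? ≠ some c) :
    rep1 c e ('\\' :: X) = '\\' :: rep1 c e X := by
  cases X with
  | nil => rw [rep1_single, rep1_nil]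
  | cons y t =>
    have : y ≠ c := by simpa using hX
    rw [rep1_cons₂]; simp [this]

-- after one pass the pattern is gone (each Python while loop runs its body at most once)
lemma rep1_no_occ (c e : Char) (he1 : e ≠ '\\') (he2 : e ≠ c) :
    ∀ (n : Nat) (l : List Char), l.length ≤ n → ¬ (['\\', c] <:+: rep1 c e l) := by
  intro n
  induction n with
  | zero => intro l hl h
            have : l = [] := by cases l <;> simp_all
            subst this; rw [rep1_nil] at h
            have := h.length_le; simp at this
  | succ n ih =>
    intro l hl h
    match l with
    | [] => rw [rep1_nil] at h; have := h.length_le; simp at this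
    | [x] => rw [rep1_single] at h; have := h.length_le; simp at this
    | x :: y :: t =>
      rw [rep1_cons₂] at h
      split_ifs at h with hm
      · rcases List.infix_cons_iff.mp h with hp | hi
        · rcases List.cons_prefix_cons.mp hp with ⟨hx1, -⟩
          exact he1 hx1.symm
        · exact ih t (by simp at hl; omega) hi
      · rcases List.infix_cons_iff.mp h with hp | hi
        · rcases (prefix_two_iff _ _ _ _).mp hp with ⟨hx1, hhd⟩
          rcases rep1_head c e y t with hh | hh
          · rw [hh] at hhd
            exact he2 (Option.some.inj hhd)
          · rw [hh] at hhd
            exact hm ⟨hx1.symm, Option.some.inj hhd⟩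
        · exact ih (y :: t) (by simp at hl ⊢; omega) hi

lemma rep1_id_of_no_occ (c e : Char) :
    ∀ (n : Nat) (l : List Char), l.length ≤ n → ¬ (['\\', c] <:+: l) → rep1 c e l = l := by
  intro n
  induction n with
  | zero => intro l hl h
            have : l = [] := by cases l <;> simp_all
            subst this; rw [rep1_nil]
  | succ n ih =>
    intro l hl h
    match l with
    | [] => rw [rep1_nil]
    | [x] => rw [rep1_single]
    | x :: y :: t =>
      rw [rep1_cons₂]
      split_ifs with hm
      · exact absurd ((prefix_two_iff _ _ _ _).mpr ⟨hm.1.symm, by simp [hm.2]⟩).isInfix h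
      · have : ¬ (['\\', c] <:+: (y :: t)) := fun hi => h (List.infix_cons_iff.mpr (Or.inr hi))
        rw [ih (y :: t) (by simp at hl ⊢; omega) this]

lemma whileReplace_eq (c e : Char) (he1 : e ≠ '\\') (he2 : e ≠ c) (l : List Char) :
    whileReplace c e l = rep1 c e l := by
  rw [whileReplace]
  split_ifs with h
  · rw [replace_eq_rep1, whileReplace]
    have hno : ¬ (['\\', c] <:+: rep1 c e l) := rep1_no_occ c e he1 he2 l.length l le_rfl
    have hfalse : ¬ (PySem.Chars.isIn ['\\', c] (rep1 c e l) = true) := fun hh =>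
      hno ((PySem.Chars.isIn_iff_infix _ _).mp hh)
    simp [hfalse]
  · have hno : ¬ (['\\', c] <:+: l) := fun hh => h ((PySem.Chars.isIn_iff_infix _ _).mpr hh)
    rw [rep1_id_of_no_occ c e l.length l le_rfl hno]

-- the three chained single passes equal B's one scan
lemma stack_eq_scan : ∀ (n : Nat) (l : List Char), l.length ≤ n →
    rep1 'r' '\r' (rep1 't' '\t' (rep1 'n' '\n' l)) = scanEsc l := by
  intro n
  induction n with
  | zero => intro l hl
            have : l = [] := by cases l <;> simp_all
            subst this; rw [rep1_nil, rep1_nil, rep1_nil, scanEsc_nil]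
  | succ n ih =>
    intro l hl
    match l with
    | [] => rw [rep1_nil, rep1_nil, rep1_nil, scanEsc_nil]
    | [x] => rw [rep1_single, rep1_single, rep1_single, scanEsc_single]
    | x :: y :: t =>
      have ht2 : t.length ≤ n := by simp at hl; omega
      have ht1 : (y :: t).length ≤ n := by simp at hl ⊢; omega
      by_cases hx : x = '\\'
      · subst hx
        by_cases hyn : y = 'n'
        · subst hyn
          rw [rep1_bs_match 'n' '\n' t,
              rep1_cons_of_ne 't' '\t' '\n' _ (by decide),
              rep1_cons_of_ne 'r' '\r' '\n' _ (by decide),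
              scanEsc_bs_hit 'n' '\n' t (by decide),
              ih t ht2]
        · by_cases hyt : y = 't'
          · subst hyt
            rw [rep1_bs_miss 'n' '\n' 't' t (by decide),
                rep1_cons_of_ne 'n' '\n' 't' t (by decide),
                rep1_bs_match 't' '\t' (rep1 'n' '\n' t),
                rep1_cons_of_ne 'r' '\r' '\t' _ (by decide),
                scanEsc_bs_hit 't' '\t' t (by decide),
                ih t ht2]
          · by_cases hyr : y = 'r'
            · subst hyr
              rw [rep1_bs_miss 'n' '\n' 'r' t (by decide),
                  rep1_cons_of_ne 'n' '\n' 'r' t (by decide),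
                  rep1_bs_miss 't' '\t' 'r' (rep1 'n' '\n' t) (by decide),
                  rep1_cons_of_ne 't' '\t' 'r' (rep1 'n' '\n' t) (by decide),
                  rep1_bs_match 'r' '\r' (rep1 't' '\t' (rep1 'n' '\n' t)),
                  scanEsc_bs_hit 'r' '\r' t (by decide),
                  ih t ht2]
            · -- x = '\\', y not a trigger: the backslash is copied by all three passes
              rw [rep1_bs_miss 'n' '\n' y t hyn]
              have h1 : (rep1 'n' '\n' (y :: t)).head? ≠ some 't' := by
                rcases rep1_head 'n' '\n' y t with hh | hh <;> rw [hh] <;> simp [hyt]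
              rw [rep1_cons_bs 't' '\t' _ h1]
              have h2 : (rep1 't' '\t' (rep1 'n' '\n' (y :: t))).head? ≠ some 'r' := by
                cases hX : rep1 'n' '\n' (y :: t) with
                | nil =>
                  rcases rep1_head 'n' '\n' y t with hh | hh <;> rw [hX] at hh <;> simp at hh
                | cons z t' =>
                  have hz : z = '\n' ∨ z = y := by
                    rcases rep1_head 'n' '\n' y t with hh | hh <;> rw [hX] at hh <;>
                      simp only [List.head?_cons, Option.some.injEq] at hh
                    · exact Or.inl hh
                    · exact Or.inr hh
                  rcases rep1_head 't' '\t' z t' with hh | hh <;> rw [hh]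
                  · simp
                  · rcases hz with hz | hz <;> rw [hz] <;> simp [hyr]
              rw [rep1_cons_bs 'r' '\r' _ h2,
                  scanEsc_bs_miss y t (bMap_get?_none y hyn hyt hyr),
                  ih (y :: t) ht1]
      · rw [rep1_cons_of_ne 'n' '\n' x _ hx,
            rep1_cons_of_ne 't' '\t' x _ hx,
            rep1_cons_of_ne 'r' '\r' x _ hx,
            scanEsc_not_bs x y t hx,
            ih (y :: t) ht1]

-- ===== VERDICT (by name: the statement is the Claim_ definition above) =====
theorem normalize_line_breaks_spec : Claim_equal_normalize_line_breaks := by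
  intro text _
  unfold Spec_normalize_line_breaks normalize_line_breaks normalize_line_breaks_alt
  rw [whileReplace_eq 'n' '\n' (by decide) (by decide),
      whileReplace_eq 't' '\t' (by decide) (by decide),
      whileReplace_eq 'r' '\r' (by decide) (by decide),
      stack_eq_scan text.toList.length text.toList le_rfl]
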